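-- pv_equiv track=rewrite | github.com/MorningMonkey/Convoy | scripts/generate_agent_index.py | find_frontmatter
-- ===== SOURCE A (Python) =====
-- from typing import Dict, List, Tuple, Optional
--
-- def find_frontmatter(lines: List[str]) -> Tuple[int, int]:
--     i = 0
--     while i < len(lines) and lines[i].strip() == "":
--         i += 1
--     if i >= len(lines) or lines[i].strip() != "---":
--         return (-1, -1)
--     start = i
--     j = start + 1
--     while j < len(lines):
--         if lines[j].strip() == "---":
--             return (start, j)
--         j += 1
--     return (start, -1)
-- ===== SOURCE B (Python) =====
-- def find_frontmatter(lines):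
--     markers = [k for k, line in enumerate(lines) if line.strip() == "---"]
--     first_nonblank = next((k for k, line in enumerate(lines) if line.strip() != ""), None)
--     if first_nonblank is None or not markers or markers[0] != first_nonblank:
--         return (-1, -1)
--     return (markers[0], markers[1] if len(markers) > 1 else -1)
-- ===== Notes on version B (the rewrite author's own statement) =====
-- stated objective: alternative
-- what changed: Replaces A's two sequential early-returning index-based while loops with a single-pass index table (all '---' marker positions plus the first non-blank position) followed by a constant-time selection.
import Mathlib
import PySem

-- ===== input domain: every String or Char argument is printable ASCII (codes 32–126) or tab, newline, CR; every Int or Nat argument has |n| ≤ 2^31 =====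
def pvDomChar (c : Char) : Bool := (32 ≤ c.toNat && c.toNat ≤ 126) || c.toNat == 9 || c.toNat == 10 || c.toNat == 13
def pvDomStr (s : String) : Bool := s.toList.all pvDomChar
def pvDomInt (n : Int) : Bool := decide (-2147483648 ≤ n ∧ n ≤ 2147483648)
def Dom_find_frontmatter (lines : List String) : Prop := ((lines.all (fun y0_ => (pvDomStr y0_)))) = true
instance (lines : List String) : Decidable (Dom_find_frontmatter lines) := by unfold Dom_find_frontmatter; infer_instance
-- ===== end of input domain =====

-- B replaces A's two sequential early-returning scans with a one-pass index table
-- (marker positions + first non-blank position) and a constant-time selection (alternative decomposition).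


-- ===== PORT A =====
-- first while loop: advance i past blank lines
def findA_skip (lines : List String) (i : Nat) : Nat :=
  if h : i < lines.length then
    if PySem.Str.strip lines[i] == "" then findA_skip lines (i + 1) else i
  else i
termination_by lines.length - i

-- second while loop: scan from j for the closing marker
def findA_scan (lines : List String) (start : Int) (j : Nat) : Int × Int :=
  if h : j < lines.length then
    if PySem.Str.strip lines[j] == "---" then (start, (j : Int))
    else findA_scan lines start (j + 1)
  else (start, -1)
termination_by lines.length - j

def find_frontmatter (lines : List String) : Int × Int :=
  let i := findA_skip lines 0
  if h : i < lines.length then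
    if PySem.Str.strip lines[i] != "---" then (-1, -1)
    else findA_scan lines (i : Int) (i + 1)
  else (-1, -1)

-- ===== PORT B =====
def find_frontmatter_alt (lines : List String) : Int × Int :=
  let markers := ((PySem.List.enumerate lines 0).filter
      (fun p => PySem.Str.strip p.2 == "---")).map Prod.fst
  let firstNonblank := ((PySem.List.enumerate lines 0).find?
      (fun p => PySem.Str.strip p.2 != "")).map Prod.fst
  match firstNonblank, markers with
  | none, _ => (-1, -1)
  | some _, [] => (-1, -1)
  | some k, m0 :: rest =>
    if m0 ≠ k then (-1, -1)
    else (m0, match rest with | m1 :: _ => m1 | [] => -1)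

-- ===== PRECONDITION & SPEC =====
def Spec_find_frontmatter (lines : List String) (out : Int × Int) : Prop := out = find_frontmatter_alt lines
instance (lines : List String) (out : Int × Int) : Decidable (Spec_find_frontmatter lines out) := by unfold Spec_find_frontmatter; infer_instance

-- ===== CLAIM (what is proved, stated in full; the proofs are below) =====
def Claim_equal_find_frontmatter : Prop := ∀ (lines : List String), Dom_find_frontmatter lines → Spec_find_frontmatter lines (find_frontmatter lines)

-- ===== LEMMAS AND PROOFS =====

-- reference decomposition both ports are reduced to
def phase2 : List String → Int → Int → Int × Int
  | [], start, _ => (start, -1)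
  | l :: ls, start, j => if PySem.Str.strip l == "---" then (start, j) else phase2 ls start (j + 1)

def phase1 : List String → Int → Int × Int
  | [], _ => (-1, -1)
  | l :: ls, i =>
    if PySem.Str.strip l == "" then phase1 ls (i + 1)
    else if PySem.Str.strip l == "---" then phase2 ls i (i + 1)
    else (-1, -1)

theorem findA_scan_eq (lines : List String) (start : Int) (j : Nat) :
    findA_scan lines start j = phase2 (lines.drop j) start j := by
  induction hn : lines.length - j generalizing j with
  | zero =>
    have h : ¬ j < lines.length := by omega
    rw [findA_scan, dif_neg h, List.drop_eq_nil_of_le (by omega), phase2]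
  | succ n ih =>
    have h : j < lines.length := by omega
    rw [List.drop_eq_getElem_cons h, findA_scan, dif_pos h, phase2]
    by_cases hm : PySem.Str.strip lines[j] == "---"
    · simp [hm]
    · simp only [hm, Bool.false_eq_true, if_false]
      have := ih (j + 1) (by omega)
      rw [this]
      push_cast
      ring_nf

theorem findA_main_eq (lines : List String) (i : Nat) :
    (if h : findA_skip lines i < lines.length then
      if PySem.Str.strip lines[findA_skip lines i] != "---" then ((-1 : Int), (-1 : Int))
      else findA_scan lines (findA_skip lines i) (findA_skip lines i + 1)
    else (-1, -1)) = phase1 (lines.drop i) i := by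
  induction hn : lines.length - i generalizing i with
  | zero =>
    have h : ¬ i < lines.length := by omega
    rw [findA_skip, dif_neg h, dif_neg h, List.drop_eq_nil_of_le (by omega), phase1]
  | succ n ih =>
    have h : i < lines.length := by omega
    rw [List.drop_eq_getElem_cons h, phase1]
    by_cases hb : PySem.Str.strip lines[i] == ""
    · have hskip : findA_skip lines i = findA_skip lines (i + 1) := by
        rw [findA_skip, dif_pos h, if_pos hb]
      rw [hskip]
      have := ih (i + 1) (by omega)
      rw [this]
      simp [hb]
    · have hskip : findA_skip lines i = i := by
        rw [findA_skip, dif_pos h, if_neg hb]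
      rw [hskip, dif_pos h]
      by_cases hm : PySem.Str.strip lines[i] == "---"
      · have hne : (PySem.Str.strip lines[i] != "---") = false := by simp [bne, hm]
        rw [hne]
        simp only [Bool.false_eq_true, if_false, hm, if_pos]
        have hb' : (PySem.Str.strip lines[i] == "") = false := by
          simpa using hb
        rw [hb']
        simp only [Bool.false_eq_true, if_false]
        rw [findA_scan_eq]
        push_cast
        ring_nf
      · have hne : (PySem.Str.strip lines[i] != "---") = true := by simp [bne, hm]
        rw [hne]
        simp [hb, hm]

def altAux (lines : List String) (s : Int) : Int × Int :=
  let markers := ((PySem.List.enumerate lines s).filter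
      (fun p => PySem.Str.strip p.2 == "---")).map Prod.fst
  let firstNonblank := ((PySem.List.enumerate lines s).find?
      (fun p => PySem.Str.strip p.2 != "")).map Prod.fst
  match firstNonblank, markers with
  | none, _ => (-1, -1)
  | some _, [] => (-1, -1)
  | some k, m0 :: rest =>
    if m0 ≠ k then (-1, -1)
    else (m0, match rest with | m1 :: _ => m1 | [] => -1)

theorem markers_ge (ls : List String) (s m : Int)
    (hm : m ∈ ((PySem.List.enumerate ls s).filter
      (fun p => PySem.Str.strip p.2 == "---")).map Prod.fst) : s ≤ m := by
  rcases List.mem_map.1 hm with ⟨p, hp, rfl⟩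
  rcases (PySem.List.mem_enumerate_iff _ _ _).1 (List.mem_filter.1 hp).1 with ⟨k, hk, rfl⟩
  simp

theorem phase2_markers (ls : List String) (s start : Int) :
    (match ((PySem.List.enumerate ls s).filter
        (fun p => PySem.Str.strip p.2 == "---")).map Prod.fst with
      | m1 :: _ => (start, m1)
      | [] => (start, -1)) = phase2 ls start s := by
  induction ls generalizing s with
  | nil => simp [PySem.List.enumerate, phase2]
  | cons l ls ih =>
    rw [PySem.List.enumerate_cons, phase2]
    by_cases hm : PySem.Str.strip l == "---"
    · simp [hm]
    · simp only [List.filter_cons, hm, Bool.false_eq_true, if_false]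
      rw [ih (s + 1)]

theorem altAux_eq (lines : List String) (s : Int) :
    altAux lines s = phase1 lines s := by
  induction lines generalizing s with
  | nil => simp [altAux, PySem.List.enumerate, phase1]
  | cons l ls ih =>
    rw [phase1]
    by_cases hb : PySem.Str.strip l == ""
    · have hstr : PySem.Str.strip l = "" := by simpa using hb
      have hm : (PySem.Str.strip l == "---") = false := by simp [hstr]
      have : altAux (l :: ls) s = altAux ls (s + 1) := by
        unfold altAux
        rw [PySem.List.enumerate_cons]
        simp [hstr]
      rw [this, ih, if_pos hb]
    · have hb' : (PySem.Str.strip l != "") = true := by simp [bne, hb]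
      by_cases hm : PySem.Str.strip l == "---"
      · have hstr : PySem.Str.strip l = "---" := by simpa using hm
        rw [if_neg (by simp [hstr]), if_pos hm]
        unfold altAux
        rw [PySem.List.enumerate_cons]
        simp only [List.filter_cons, hm, if_pos, List.find?_cons, hb', List.map_cons,
          Option.map_some]
        rw [← phase2_markers ls (s + 1) s]
        cases ((PySem.List.enumerate ls (s + 1)).filter
            (fun p => PySem.Str.strip p.2 == "---")).map Prod.fst with
        | nil => simp
        | cons m1 rest => simp
      · rw [if_neg hb, if_neg hm]
        unfold altAux
        rw [PySem.List.enumerate_cons]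
        simp only [List.filter_cons, hm, Bool.false_eq_true, if_false,
          List.find?_cons, hb', Option.map_some]
        cases hL : ((PySem.List.enumerate ls (s + 1)).filter
            (fun p => PySem.Str.strip p.2 == "---")).map Prod.fst with
        | nil => simp
        | cons m0 rest =>
          have : s + 1 ≤ m0 := markers_ge ls (s + 1) m0 (hL ▸ List.mem_cons_self ..)
          simp only []
          rw [if_pos (by omega)]

-- ===== VERDICT (by name: the statement is the Claim_ definition above) =====
theorem find_frontmatter_spec : Claim_equal_find_frontmatter := by
  intro lines _
  unfold Spec_find_frontmatter find_frontmatter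
  have hA := findA_main_eq lines 0
  simp only [List.drop_zero] at hA
  have hB : find_frontmatter_alt lines = altAux lines 0 := rfl
  rw [hB, altAux_eq]
  exact hA
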